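-- pv_equiv track=rewrite | github.com/brevf/locating_pr_power_infrastructure_in_ntl_pixels | src/extract_pixel_values_to_lines.py | qf_cloud_mask
-- ===== SOURCE A (Python) =====
-- def qf_cloud_mask(qf):
--
--     unpacked = bin(qf)[2:]
--
--     while len(unpacked) < 16:
--         unpacked = '0' + unpacked
--
--     reversed = ''
--
--     unpacked_list = list(unpacked)
--     while unpacked_list:
--         reversed += unpacked_list.pop()
--
--     day = False
--     if reversed[0] == '1':
--         day = True
--
--     cloud = False
--     if reversed[9] == '1':
--         cloud = True
--
--     shadow = False
--     if reversed[8] == '1':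
--         shadow = True
--
--     # looking at bit 1-3, recall that python is not in-point inclusive
--     sea = False
--     if reversed[1:4] == "011":
--         sea = True
--
--     return day, cloud, shadow, sea
-- ===== SOURCE B (Python) =====
-- def qf_cloud_mask(qf):
--     def bit(i):
--         return qf // 2 ** i % 2 == 1
--     day = bit(0)
--     cloud = bit(9)
--     shadow = bit(8)
--     sea = (not bit(1)) and bit(2) and bit(3)
--     return day, cloud, shadow, sea
-- ===== Notes on version B (the rewrite author's own statement) =====
-- stated objective: simpler
-- what changed: Replaces the bin()-string construction, the left-padding while loop, the pop()-based reversal and the character/slice comparisons by direct arithmetic bit extraction (floor-divide by a power of two, then test parity) on the integer.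
-- outside the precondition, e.g. on qf_cloud_mask(-5): A returns (True, False, False, False), B returns (True, True, True, False)
import Mathlib
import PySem

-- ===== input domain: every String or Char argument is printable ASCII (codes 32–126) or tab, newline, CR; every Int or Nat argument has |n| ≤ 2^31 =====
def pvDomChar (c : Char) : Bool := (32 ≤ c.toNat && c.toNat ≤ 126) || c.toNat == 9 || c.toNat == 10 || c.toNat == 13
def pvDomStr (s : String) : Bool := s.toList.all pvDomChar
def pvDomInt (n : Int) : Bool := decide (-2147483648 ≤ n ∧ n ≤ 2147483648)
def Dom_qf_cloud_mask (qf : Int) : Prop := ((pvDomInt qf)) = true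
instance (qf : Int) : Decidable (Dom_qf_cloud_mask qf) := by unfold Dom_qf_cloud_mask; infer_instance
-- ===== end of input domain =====

-- B replaces A's bin()-string build / padding loop / pop-reversal / slice comparison by direct
-- arithmetic bit tests qf // 2**i % 2 (simpler); equivalence is proved for nonnegative qf.


-- ===== PORT A =====
-- bin(n)[2:] for n ≥ 0: binary digits, most significant first (bin(0)[2:] = "0")
def pvBinNat (n : Nat) : List Char :=
  if _h : n < 2 then [if n = 1 then '1' else '0']
  else pvBinNat (n / 2) ++ [if n % 2 = 1 then '1' else '0']
decreasing_by exact Nat.div_lt_self (by omega) (by omega)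

-- the `while len(unpacked) < 16: unpacked = '0' + unpacked` loop
def pvPadLoop (l : List Char) : List Char :=
  if l.length < 16 then pvPadLoop ('0' :: l) else l
termination_by 16 - l.length
decreasing_by simp_all; omega

-- the `while unpacked_list: reversed += unpacked_list.pop()` loop
def pvPopRev (l acc : List Char) : List Char :=
  if h : l = [] then acc else pvPopRev l.dropLast (acc ++ [l.getLast h])
termination_by l.length
decreasing_by simp [List.length_dropLast]; cases l <;> simp_all

def qf_cloud_mask (qf : Int) : Bool × Bool × Bool × Bool :=
  -- bin(qf)[2:]: for negative qf, bin gives '-0b…' so [2:] keeps a leading 'b' — exact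
  let unpacked : List Char :=
    if qf < 0 then 'b' :: pvBinNat qf.natAbs else pvBinNat qf.natAbs
  let padded := pvPadLoop unpacked
  let rev := pvPopRev padded []
  let day : Bool := PySem.List.pyGet? rev 0 == some '1'
  let cloud : Bool := PySem.List.pyGet? rev 9 == some '1'
  let shadow : Bool := PySem.List.pyGet? rev 8 == some '1'
  let sea : Bool := PySem.List.slice rev (some 1) (some 4) == ['0', '1', '1']
  (day, cloud, shadow, sea)

-- ===== PORT B =====
def qf_cloud_mask_alt (qf : Int) : Bool × Bool × Bool × Bool :=
  let bit : Nat → Bool := fun i => PySem.Int.mod (PySem.Int.floordiv qf (2 ^ i)) 2 == 1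
  let day := bit 0
  let cloud := bit 9
  let shadow := bit 8
  let sea := !bit 1 && bit 2 && bit 3
  (day, cloud, shadow, sea)

-- ===== PRECONDITION & SPEC =====
-- Pre_ excludes negative qf, on which A returns flags parsed from the '-0b…' string (its [2:]
-- still contains the 'b' marker) — an artefact of bin(); the flag is an unsigned bit field and
-- B reads the two's-complement bits there instead.
def Pre_qf_cloud_mask (qf : Int) : Prop := 0 ≤ qf
instance (qf : Int) : Decidable (Pre_qf_cloud_mask qf) := by unfold Pre_qf_cloud_mask; infer_instance
def pvWitness_qf_cloud_mask : Int := 774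

def Spec_qf_cloud_mask (qf : Int) (out : Bool × Bool × Bool × Bool) : Prop := out = qf_cloud_mask_alt qf
instance (qf : Int) (out : Bool × Bool × Bool × Bool) : Decidable (Spec_qf_cloud_mask qf out) := by unfold Spec_qf_cloud_mask; infer_instance

-- ===== CLAIM (what is proved, stated in full; the proofs are below) =====
def Claim_equal_qf_cloud_mask : Prop := ∀ (qf : Int), Dom_qf_cloud_mask qf → Pre_qf_cloud_mask qf → Spec_qf_cloud_mask qf (qf_cloud_mask qf)

-- ===== LEMMAS AND PROOFS =====

theorem pvPopRev_eq (l acc : List Char) : pvPopRev l acc = acc ++ l.reverse := by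
  induction l using List.reverseRecOn generalizing acc with
  | nil => simp [pvPopRev]
  | append_singleton xs x ih =>
      rw [pvPopRev]
      simp [ih]

theorem pvPadLoop_eq (k : Nat) : ∀ l : List Char, 16 - l.length = k →
    pvPadLoop l = List.replicate k '0' ++ l := by
  induction k with
  | zero => intro l h; rw [pvPadLoop]; rw [if_neg (by omega)]; simp
  | succ k ih =>
      intro l h
      rw [pvPadLoop, if_pos (by omega)]
      rw [ih ('0' :: l) (by simp; omega)]
      rw [List.replicate_succ']
      simp

theorem pvBinNat_getD (m : Nat) : ∀ i : Nat,
    ((pvBinNat m).reverse).getD i '0' = if m.testBit i then '1' else '0' := by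
  induction m using Nat.strong_induction_on with
  | _ m ih =>
    intro i
    rw [pvBinNat]
    by_cases h : m < 2
    · rw [dif_pos h]
      interval_cases m <;> cases i <;>
        simp [List.getD, Nat.testBit_zero, Nat.testBit_add_one]
    · rw [dif_neg h]
      have hrec := ih (m / 2) (Nat.div_lt_self (by omega) (by omega))
      cases i with
      | zero =>
          simp [Nat.testBit_zero]
      | succ i =>
          simp only [List.reverse_append, List.reverse_singleton, List.singleton_append,
            List.getD_cons_succ]
          rw [hrec i, Nat.testBit_add_one]

theorem pvGetD_append_replicate (a : List Char) (k i : Nat) :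
    (a ++ List.replicate k '0').getD i '0' = a.getD i '0' := by
  rcases Nat.lt_or_ge i a.length with h | h
  · exact List.getD_append _ _ _ _ h
  · rw [List.getD_eq_default _ _ h]
    rcases Nat.lt_or_ge i (a.length + k) with h2 | h2
    · rw [List.getD_eq_getElem _ _ (by simp; omega)]
      rw [List.getElem_append_right (by omega)]
      simp
    · exact List.getD_eq_default _ _ (by simp; omega)

-- the reversed padded string: its i-th character is bit i of m (default '0')
theorem pvRev_getD (m : Nat) (i : Nat) :
    (pvPopRev (pvPadLoop (pvBinNat m)) []).getD i '0' = if m.testBit i then '1' else '0' := by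
  rw [pvPopRev_eq, List.nil_append,
    pvPadLoop_eq (16 - (pvBinNat m).length) (pvBinNat m) rfl,
    List.reverse_append, List.reverse_replicate,
    pvGetD_append_replicate, pvBinNat_getD]

theorem pvRev_length (m : Nat) :
    16 ≤ (pvPopRev (pvPadLoop (pvBinNat m)) []).length := by
  rw [pvPopRev_eq, List.nil_append,
    pvPadLoop_eq (16 - (pvBinNat m).length) (pvBinNat m) rfl]
  simp
  omega

theorem pvTake3_drop1 (l : List Char) (h : 4 ≤ l.length) :
    (l.drop 1).take 3 = [l.getD 1 '0', l.getD 2 '0', l.getD 3 '0'] := by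
  rcases l with _ | ⟨a, _ | ⟨b, _ | ⟨c, _ | ⟨d, t⟩⟩⟩⟩ <;> simp_all [List.getD]

theorem pvBit_alt (m : Nat) (i : Nat) :
    (PySem.Int.mod (PySem.Int.floordiv (m : Int) (2 ^ i)) 2 == 1) = m.testBit i := by
  have h1 : PySem.Int.floordiv (m : Int) (2 ^ i) = ((m / 2 ^ i : Nat) : Int) := by
    have h2i : ((2 : Int) ^ i) = ((2 ^ i : Nat) : Int) := by push_cast; ring
    rw [h2i, PySem.Int.floordiv_natCast]
  have h2 : PySem.Int.mod ((m / 2 ^ i : Nat) : Int) 2 = ((m / 2 ^ i % 2 : Nat) : Int) := by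
    exact_mod_cast PySem.Int.mod_natCast (m / 2 ^ i) 2
  rw [h1, h2, Nat.testBit, Nat.shiftRight_eq_div_pow, Nat.and_comm, Nat.and_one_is_mod]
  rcases Nat.mod_two_eq_zero_or_one (m / 2 ^ i) with h | h <;> simp [h]

-- ===== VERDICT (by name: the statement is the Claim_ definition above) =====
theorem qf_cloud_mask_spec : Claim_equal_qf_cloud_mask := by
  intro qf _ hpre
  obtain ⟨m, rfl⟩ := Int.eq_ofNat_of_zero_le hpre
  unfold Spec_qf_cloud_mask qf_cloud_mask qf_cloud_mask_alt
  simp only []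
  rw [if_neg (by omega)]
  have hm : (Int.natAbs (m : Int)) = m := Int.natAbs_natCast m
  rw [hm]
  set r := pvPopRev (pvPadLoop (pvBinNat m)) [] with hr
  have hlen : 16 ≤ r.length := pvRev_length m
  have hget : ∀ i : Nat, i < 16 → PySem.List.pyGet? r (i : Int) = some (if m.testBit i then '1' else '0') := by
    intro i hi
    rw [PySem.List.pyGet?_natCast]
    rw [List.getElem?_eq_getElem (by omega)]
    rw [← List.getD_eq_getElem r '0' (by omega), pvRev_getD]
  have h0 := hget 0 (by omega)
  have h8 := hget 8 (by omega)
  have h9 := hget 9 (by omega)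
  simp only [Nat.cast_ofNat, Nat.cast_zero] at h0 h8 h9
  rw [h0, h8, h9]
  have hslice : PySem.List.slice r (some 1) (some 4) =
      [if m.testBit 1 then '1' else '0', if m.testBit 2 then '1' else '0',
       if m.testBit 3 then '1' else '0'] := by
    rw [show (1 : Int) = ((1 : Nat) : Int) from rfl, show (4 : Int) = ((4 : Nat) : Int) from rfl]
    rw [PySem.List.slice_natCast]
    rw [pvTake3_drop1 r (by omega)]
    rw [← hr] at *
    rw [pvRev_getD, pvRev_getD, pvRev_getD]
  rw [hslice]
  rw [pvBit_alt, pvBit_alt, pvBit_alt, pvBit_alt, pvBit_alt, pvBit_alt]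
  cases h1 : m.testBit 0 <;> cases h2 : m.testBit 1 <;> cases h3 : m.testBit 2 <;>
    cases h4 : m.testBit 3 <;> cases h5 : m.testBit 8 <;> cases h6 : m.testBit 9 <;> rfl
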